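-- pv_equiv track=rewrite | github.com/BoostcampAI2Study/Coding_Study | 220512_(카카오) 신고 결과 받기/신고 결과 받기_SJH.py | solution
-- ===== SOURCE A (Python) =====
-- from collections import defaultdict
--
-- def solution(id_list, report, k):
--     answer = []
--     report_dict = defaultdict(set)      # 각 유저가 신고한 유저
--     reported_count = defaultdict(int)   # 신고받은 횟수
--     stop = set()
--
--     for pair in report:
--         uid, r_uid = pair.split()   # 신고한 유저, 신고당한 유저
--
--         # 해당 유저를 이미 신고했다면 pass
--         if r_uid in report_dict[uid]:
--             continue
--
--         # 신고한 유저 기록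
--         report_dict[uid].add(r_uid)
--
--         # 신고된 유저 count 이미 정지된 유저는 pass
--         if r_uid not in stop:
--             reported_count[r_uid] += 1
--
--             # k회 이상 신고되었으면 set에 저장
--             if reported_count[r_uid] == k:
--                 stop.add(r_uid)
--
--     # 메일 받은 횟수 구하기
--     for uid in id_list:
--         answer.append(len(report_dict[uid]&stop))
--
--
--     return answer
-- ===== SOURCE B (Python) =====
-- def solution(id_list, report, k):
--     # Phase 1: dedup all reports into one set of distinct (reporter, reported) pairs.
--     distinct = {tuple(p.split()) for p in report}
--     # Phase 2: a user is banned iff at least k distinct users reported them.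
--     banned = {v for (_, v) in distinct
--               if sum(1 for (_, v2) in distinct if v2 == v) >= k}
--     # Phase 3: per uid, count how many of the distinct users uid reported got banned.
--     return [sum(1 for (u, v) in distinct if u == uid and v in banned)
--             for uid in id_list]
-- ===== Notes on version B (the rewrite author's own statement) =====
-- stated objective: alternative
-- what changed: Replaces A's single interleaved pass (per-user report sets, running counts with an early-stop '== k' ban set, then set intersections) by three separate phases: dedup all reports into one global set of distinct (reporter, reported) pairs, derive the banned set by comparing each user's distinct-reporter count against k, and a final scan counting each uid's banned targets.
-- intended difference: For a non-positive threshold k <= 0 (with at least one report whose reporter is in id_list), A returns all zeros because its running count starts at 1 so '== k' never fires, while B bans every reported user since any distinct-reporter count is >= k; B's reading of 'at least k reports' is the intended one for a degenerate threshold. — e.g. on solution(["a", "b"], ["a b"], 0): A returns [0, 0], B returns [1, 0]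
import Mathlib
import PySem

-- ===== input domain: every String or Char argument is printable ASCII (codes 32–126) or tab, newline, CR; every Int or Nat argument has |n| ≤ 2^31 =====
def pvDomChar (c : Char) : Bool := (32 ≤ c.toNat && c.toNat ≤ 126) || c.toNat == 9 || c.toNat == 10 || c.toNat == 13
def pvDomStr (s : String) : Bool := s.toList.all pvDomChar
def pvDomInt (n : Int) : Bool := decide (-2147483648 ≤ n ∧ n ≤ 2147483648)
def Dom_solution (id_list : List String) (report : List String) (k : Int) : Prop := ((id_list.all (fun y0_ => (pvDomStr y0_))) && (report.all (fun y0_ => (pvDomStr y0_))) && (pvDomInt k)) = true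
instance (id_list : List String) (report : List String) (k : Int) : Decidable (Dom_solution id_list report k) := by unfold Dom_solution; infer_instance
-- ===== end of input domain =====

-- B restructures A's single interleaved counting pass into three separate phases
-- (global pair dedup, distinct-reporter count against the threshold, final scan);
-- no speed claim ("alternative").  On k ≤ 0 (with a reporter present in id_list) the
-- two differ as stated in D_solution below.

-- ===== PORT A =====
-- One fold over `report` carrying A's three mutable structures
-- (report_dict, reported_count, stop).  defaultdict reads are ported as getD with the
-- default value: A's auto-insertion of defaults on access is never observable here (the
-- dicts are only read via lookups afterwards).  A raises ValueError when a report line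
-- does not split into exactly two words; those inputs are excluded by Pre_solution
-- (the `| _ =>` branch is unreachable under it).
def solutionStep (k : Int)
    (st : PySem.Dict String (PySem.Set String) × PySem.Dict String Int × PySem.Set String)
    (pair : String) :
    PySem.Dict String (PySem.Set String) × PySem.Dict String Int × PySem.Set String :=
  let (rd, rc, stop) := st
  match PySem.Str.split₀ pair with
  | [uid, r_uid] =>
    let s := rd.getD uid PySem.Set.empty
    if PySem.Set.contains s r_uid then (rd, rc, stop)
    else
      let rd' := rd.insert uid (PySem.Set.add s r_uid)
      if PySem.Set.contains stop r_uid then (rd', rc, stop)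
      else
        let c := rc.getD r_uid 0 + 1
        let rc' := rc.insert r_uid c
        if c == k then (rd', rc', PySem.Set.add stop r_uid)
        else (rd', rc', stop)
  | _ => (rd, rc, stop)

def solution (id_list : List String) (report : List String) (k : Int) : List Int :=
  let st := report.foldl (solutionStep k) (PySem.Dict.empty, PySem.Dict.empty, PySem.Set.empty)
  id_list.map (fun uid =>
    (PySem.Set.len (PySem.Set.inter (st.1.getD uid PySem.Set.empty) st.2.2) : Int))

-- ===== PORT B =====
-- Phase 1: dedup all reports into one set of distinct (reporter, reported) pairs.
-- (Python B raises ValueError on a line that does not split into two words, like A;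
-- the `| _ =>` branch is excluded by Pre_solution.)
def solutionAltDistinct (report : List String) : PySem.Set (String × String) :=
  report.foldl (fun acc p =>
    match PySem.Str.split₀ p with
    | [u, v] => PySem.Set.add acc (u, v)
    | _ => acc) PySem.Set.empty

-- Phase 2 (banned = users reported by at least k distinct reporters) and
-- phase 3 (per uid, count its distinct banned targets).
def solution_alt (id_list : List String) (report : List String) (k : Int) : List Int :=
  let distinct := solutionAltDistinct report
  let banned : PySem.Set String :=
    PySem.Set.ofList ((distinct.filter (fun uv =>
      decide ((distinct.countP (fun uv2 => uv2.2 == uv.2) : Int) ≥ k))).map (·.2))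
  id_list.map (fun uid =>
    (distinct.countP (fun uv => uv.1 == uid && PySem.Set.contains banned uv.2) : Int))

-- ===== PRECONDITION & SPEC =====
-- Pre_ excludes exactly the inputs on which A raises ValueError: a report entry that
-- does not split into exactly two whitespace-separated words (B raises there as well).
def Pre_solution (id_list : List String) (report : List String) (k : Int) : Prop :=
  ∀ p ∈ report, (PySem.Str.split₀ p).length = 2
instance (id_list : List String) (report : List String) (k : Int) : Decidable (Pre_solution id_list report k) := by unfold Pre_solution; infer_instance

def pvWitness_solution : List String × List String × Int :=
  (["muzi", "frodo", "apeach", "neo"],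
   ["muzi frodo", "apeach frodo", "frodo neo", "muzi neo", "apeach muzi"], 2)

-- On k ≤ 0 with at least one report whose reporter is in id_list, A returns all zeros
-- (its running count starts at 1, so '== k' never fires and nobody is ever banned),
-- while B bans every reported user (any distinct-reporter count is ≥ k); B's reading of
-- 'at least k reports' is the intended one for a degenerate threshold.
def D_solution (id_list : List String) (report : List String) (k : Int) : Prop :=
  k ≤ 0 ∧ (report.any (fun p =>
    match PySem.Str.split₀ p with
    | [u, _] => id_list.contains u
    | _ => false)) = true
instance (id_list : List String) (report : List String) (k : Int) : Decidable (D_solution id_list report k) := by unfold D_solution; infer_instance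

def Spec_solution (id_list : List String) (report : List String) (k : Int) (out : List Int) : Prop := ¬ D_solution id_list report k → out = solution_alt id_list report k
instance (id_list : List String) (report : List String) (k : Int) (out : List Int) : Decidable (Spec_solution id_list report k out) := by unfold Spec_solution; infer_instance

def pvDiffWitness_solution : List String × List String × Int := (["a", "b"], ["a b"], 0)
def pvDiffWitnessOut_solution : (List Int) × (List Int) := ([0, 0], [1, 0])

-- ===== CLAIM (what is proved, stated in full; the proofs are below) =====
def Claim_unchanged_solution : Prop := ∀ (id_list : List String) (report : List String) (k : Int), Dom_solution id_list report k → Pre_solution id_list report k → Spec_solution id_list report k (solution id_list report k)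
def Claim_changed_solution : Prop := Dom_solution (pvDiffWitness_solution.1) (pvDiffWitness_solution.2.1) (pvDiffWitness_solution.2.2) ∧ Pre_solution (pvDiffWitness_solution.1) (pvDiffWitness_solution.2.1) (pvDiffWitness_solution.2.2) ∧ D_solution (pvDiffWitness_solution.1) (pvDiffWitness_solution.2.1) (pvDiffWitness_solution.2.2) ∧ solution (pvDiffWitness_solution.1) (pvDiffWitness_solution.2.1) (pvDiffWitness_solution.2.2) = pvDiffWitnessOut_solution.1 ∧ solution_alt (pvDiffWitness_solution.1) (pvDiffWitness_solution.2.1) (pvDiffWitness_solution.2.2) = pvDiffWitnessOut_solution.2 ∧ pvDiffWitnessOut_solution.1 ≠ pvDiffWitnessOut_solution.2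
def Claim_exact_solution : Prop := ∀ (id_list : List String) (report : List String) (k : Int), Dom_solution id_list report k → Pre_solution id_list report k → D_solution id_list report k → solution id_list report k ≠ solution_alt id_list report k

-- ===== LEMMAS AND PROOFS =====

-- The invariant (for k ≥ 1) tying A's fold state (report_dict, reported_count, stop) to
-- B's set D of distinct (reporter, reported) pairs built from the same prefix of `report`:
-- report_dict[u] lists the users u reported in first-report order, reported_count[v] is
-- v's distinct-reporter count capped at k, and stop holds exactly the users with at
-- least k distinct reporters.
def solInv (k : Int) (D : PySem.Set (String × String))
    (st : PySem.Dict String (PySem.Set String) × PySem.Dict String Int × PySem.Set String) : Prop :=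
  (∀ u, st.1.getD u PySem.Set.empty = (D.filter (fun uv => uv.1 == u)).map (·.2)) ∧
  (∀ v, st.2.1.getD v 0 =
    (if k ≤ (D.countP (fun uv => uv.2 == v) : Int) then k
     else (D.countP (fun uv => uv.2 == v) : Int))) ∧
  (∀ v, PySem.Set.contains st.2.2 v = true ↔
    k ≤ (D.countP (fun uv => uv.2 == v) : Int))

theorem mem_map_snd_filter (D : List (String × String)) (u v : String) :
    v ∈ (D.filter (fun uv => uv.1 == u)).map (·.2) ↔ (u, v) ∈ D := by
  simp only [List.mem_map, List.mem_filter, beq_iff_eq]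
  constructor
  · rintro ⟨⟨a, b⟩, ⟨hm, h1⟩, h2⟩
    simp only at h1 h2
    subst h1; subst h2; exact hm
  · intro h; exact ⟨(u, v), ⟨h, rfl⟩, rfl⟩

theorem solInv_init (k : Int) (hk : 1 ≤ k) :
    solInv k PySem.Set.empty (PySem.Dict.empty, PySem.Dict.empty, PySem.Set.empty) := by
  refine ⟨?_, ?_, ?_⟩ <;> intro x
  · simp [PySem.Set.empty, PySem.Dict.getD_empty]
  · simp only [PySem.Set.empty, PySem.Dict.getD_empty, List.countP_nil, Nat.cast_zero]
    rw [if_neg (by omega)]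
  · simp only [PySem.Set.empty, PySem.Set.contains, List.countP_nil, Nat.cast_zero]
    simp; omega

theorem solInv_step (k : Int) (hk : 1 ≤ k) (D : PySem.Set (String × String)) (st) (p : String)
    (hp : (PySem.Str.split₀ p).length = 2) (h : solInv k D st) :
    solInv k (match PySem.Str.split₀ p with
              | [u, v] => PySem.Set.add D (u, v)
              | _ => D) (solutionStep k st p) := by
  obtain ⟨rd, rc, stop⟩ := st
  obtain ⟨u, v, hsplit⟩ : ∃ u v, PySem.Str.split₀ p = [u, v] := by
    rcases e : PySem.Str.split₀ p with _ | ⟨a, _ | ⟨b, _ | ⟨c, t⟩⟩⟩ <;>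
      simp_all
  obtain ⟨h1, h2, h3⟩ := h
  simp only [solutionStep, hsplit]
  by_cases hc : PySem.Set.contains (rd.getD u PySem.Set.empty) v = true
  · -- already reported: state and D unchanged
    have hmem : (u, v) ∈ D := by
      rw [PySem.Set.contains_iff, h1 u, mem_map_snd_filter] at hc
      exact hc
    simp only [hc, if_true, PySem.Set.add_of_mem hmem]
    exact ⟨h1, h2, h3⟩
  · have hvs : v ∉ rd.getD u PySem.Set.empty := by
      intro hm; exact hc ((PySem.Set.contains_iff _ _).2 hm)
    have hnot : (u, v) ∉ D := by
      intro hm; exact hvs (by rw [h1 u]; exact (mem_map_snd_filter D u v).2 hm)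
    have hadd : PySem.Set.add D (u, v) = D ++ [(u, v)] := PySem.Set.add_of_not_mem hnot
    have hcomp1 : ∀ u', (rd.insert u (PySem.Set.add (rd.getD u PySem.Set.empty) v)).getD u' PySem.Set.empty
        = ((D ++ [(u, v)]).filter (fun uv => uv.1 == u')).map (·.2) := by
      intro u'
      rw [PySem.Dict.getD_insert, List.filter_append, List.map_append]
      by_cases hu : u' = u
      · subst hu
        rw [if_pos rfl, PySem.Set.add_of_not_mem hvs, h1 u']
        simp
      · rw [if_neg hu, h1 u']
        have : ((u, v).1 == u') = false := by simp [Ne.symm hu]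
        simp [this]
    have hcnt_self : ((D ++ [(u, v)]).countP (fun uv => uv.2 == v) : Int)
        = (D.countP (fun uv => uv.2 == v) : Int) + 1 := by
      rw [List.countP_append]; simp
    have hcnt_ne : ∀ w, v ≠ w → ((D ++ [(u, v)]).countP (fun uv => uv.2 == w) : Int)
        = (D.countP (fun uv => uv.2 == w) : Int) := by
      intro w hw
      rw [List.countP_append]; simp [hw]
    simp only [Bool.not_eq_true] at hc
    simp only [hc, Bool.false_eq_true, if_false, hadd]
    by_cases hs : PySem.Set.contains stop v = true
    · -- reported user already banned: count not incremented
      have hkv := (h3 v).1 hs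
      simp only [hs, if_true]
      refine ⟨hcomp1, ?_, ?_⟩
      · intro w
        by_cases hw : v = w
        · subst hw
          rw [hcnt_self, h2 v, if_pos hkv, if_pos (by omega)]
        · rw [hcnt_ne w hw, h2 w]
      · intro w
        by_cases hw : v = w
        · subst hw
          rw [hcnt_self, h3 v]
          constructor <;> (intro hh; omega)
        · rw [hcnt_ne w hw, h3 w]
    · have hnk : ¬ k ≤ (D.countP (fun uv => uv.2 == v) : Int) := by
        intro hh; exact hs ((h3 v).2 hh)
      have hc2 : rc.getD v 0 = (D.countP (fun uv => uv.2 == v) : Int) := by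
        rw [h2 v, if_neg hnk]
      simp only [Bool.not_eq_true] at hs
      simp only [hs, Bool.false_eq_true, if_false, hc2]
      by_cases hck : (D.countP (fun uv => uv.2 == v) : Int) + 1 = k
      · have hb : ((D.countP (fun uv => uv.2 == v) : Int) + 1 == k) = true := by
          simp [hck]
        simp only [hb, if_true]
        refine ⟨hcomp1, ?_, ?_⟩
        · intro w
          rw [PySem.Dict.getD_insert]
          by_cases hw : w = v
          · subst hw
            rw [if_pos rfl, hcnt_self, if_pos (by omega)]
            omega
          · rw [if_neg hw, h2 w, hcnt_ne w (fun hx => hw hx.symm)]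
        · intro w
          by_cases hw : v = w
          · subst hw
            rw [hcnt_self, PySem.Set.contains_iff, PySem.Set.mem_add]
            constructor
            · intro _; omega
            · intro _; exact Or.inr rfl
          · rw [hcnt_ne w hw, PySem.Set.contains_iff, PySem.Set.mem_add, ← PySem.Set.contains_iff, h3 w]
            constructor
            · rintro (hh | hh)
              · exact hh
              · exact absurd hh.symm hw
            · exact Or.inl
      · have hb : ((D.countP (fun uv => uv.2 == v) : Int) + 1 == k) = false := by
          simp [hck]
        simp only [hb, Bool.false_eq_true, if_false]
        refine ⟨hcomp1, ?_, ?_⟩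
        · intro w
          rw [PySem.Dict.getD_insert]
          by_cases hw : w = v
          · subst hw
            rw [if_pos rfl, hcnt_self, if_neg (by omega)]
          · rw [if_neg hw, h2 w, hcnt_ne w (fun hx => hw hx.symm)]
        · intro w
          by_cases hw : v = w
          · subst hw
            rw [hcnt_self, h3 v]
            constructor <;> (intro hh; omega)
          · rw [hcnt_ne w hw, h3 w]

theorem solInv_foldl_aux (k : Int) (hk : 1 ≤ k) (l : List String) :
    ∀ D st, (∀ p ∈ l, (PySem.Str.split₀ p).length = 2) → solInv k D st →
    solInv k (l.foldl (fun acc p =>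
        match PySem.Str.split₀ p with
        | [u, v] => PySem.Set.add acc (u, v)
        | _ => acc) D)
      (l.foldl (solutionStep k) st) := by
  induction l with
  | nil => intro D st _ h; exact h
  | cons p l ih =>
    intro D st hp h
    simp only [List.foldl_cons]
    exact ih _ _ (fun q hq => hp q (List.mem_cons_of_mem _ hq))
      (solInv_step k hk D st p (hp p (List.mem_cons_self)) h)

theorem solInv_foldl (k : Int) (hk : 1 ≤ k) (report : List String)
    (hp : ∀ p ∈ report, (PySem.Str.split₀ p).length = 2) :
    solInv k (solutionAltDistinct report)
      (report.foldl (solutionStep k) (PySem.Dict.empty, PySem.Dict.empty, PySem.Set.empty)) := by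
  exact solInv_foldl_aux k hk report PySem.Set.empty _ hp (solInv_init k hk)

-- A = B for k ≥ 1 (the invariant argument).
theorem solution_eq_alt_of_pos (id_list : List String) (report : List String) (k : Int)
    (hk : 1 ≤ k) (hpre : ∀ p ∈ report, (PySem.Str.split₀ p).length = 2) :
    solution id_list report k = solution_alt id_list report k := by
  obtain ⟨h1, h2, h3⟩ := solInv_foldl k hk report hpre
  simp only [solution, solution_alt]
  apply List.map_congr_left
  intro uid _
  apply (fun (a b : Nat) (h : a = b) => by rw [h] : ∀ a b : Nat, a = b → (a : Int) = (b : Int))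
  set st := report.foldl (solutionStep k) (PySem.Dict.empty, PySem.Dict.empty, PySem.Set.empty) with hst
  set D := solutionAltDistinct report with hD
  -- A's per-uid value as a countP over D
  rw [show PySem.Set.inter (st.1.getD uid PySem.Set.empty) st.2.2
      = (st.1.getD uid PySem.Set.empty).filter (fun x => PySem.Set.contains st.2.2 x) from rfl]
  rw [h1 uid, List.filter_map, List.length_map, ← List.countP_eq_length_filter,
    List.countP_filter]
  -- banned membership agrees with stop membership on elements of D
  have hban : ∀ w, (∃ uv ∈ D, uv.2 = w) →
      PySem.Set.contains (PySem.Set.ofList ((D.filter (fun uv =>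
        decide ((D.countP (fun uv2 => uv2.2 == uv.2) : Int) ≥ k))).map (·.2))) w
      = PySem.Set.contains st.2.2 w := by
    intro w hw
    rw [Bool.eq_iff_iff, PySem.Set.contains_iff, PySem.Set.mem_ofList, h3 w]
    simp only [List.mem_map, List.mem_filter, decide_eq_true_eq, ge_iff_le]
    constructor
    · rintro ⟨uv', ⟨_, hcond⟩, hw'⟩
      rw [hw'] at hcond
      exact hcond
    · intro hcond
      obtain ⟨uv, huv, hw'⟩ := hw
      exact ⟨uv, ⟨huv, by rw [hw']; exact hcond⟩, hw'⟩
  apply List.countP_congr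
  intro uv huv
  have := hban uv.2 ⟨uv, huv, rfl⟩
  simp only [Function.comp] at *
  rw [this, Bool.and_comm]

-- For k ≤ 0, A's stop set stays empty (its running count is always ≥ 1 when tested
-- against '== k'), so every entry of A's answer is 0.
theorem solutionStep_nonpos (k : Int) (hk : k ≤ 0)
    (st : PySem.Dict String (PySem.Set String) × PySem.Dict String Int × PySem.Set String)
    (p : String) (h1 : st.2.2 = PySem.Set.empty) (h2 : ∀ v, 0 ≤ st.2.1.getD v 0) :
    (solutionStep k st p).2.2 = PySem.Set.empty ∧
    ∀ v, 0 ≤ (solutionStep k st p).2.1.getD v 0 := by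
  obtain ⟨rd, rc, stop⟩ := st
  simp only at h1 h2
  subst h1
  rcases e : PySem.Str.split₀ p with _ | ⟨u, _ | ⟨v, _ | ⟨w, t⟩⟩⟩ <;>
    simp only [solutionStep, e]
  · exact ⟨by first | rfl | trivial, h2⟩
  · exact ⟨by first | rfl | trivial, h2⟩
  · -- the two-word case: stop is empty, the '== k' test can never fire for k ≤ 0
    split
    · exact ⟨by first | rfl | trivial, h2⟩
    · have hcont : PySem.Set.contains PySem.Set.empty v = false := rfl
      have hck : (rc.getD v 0 + 1 == k) = false := by
        simp only [beq_eq_false_iff_ne, ne_eq]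
        have := h2 v
        omega
      simp only [hcont, Bool.false_eq_true, if_false, hck]
      refine ⟨by first | rfl | trivial, fun x => ?_⟩
      simp only [PySem.Dict.getD_insert]
      have := h2 v
      have := h2 x
      split <;> omega
  · exact ⟨by first | rfl | trivial, h2⟩

theorem solution_stop_empty_aux (k : Int) (hk : k ≤ 0) (l : List String) :
    ∀ st, st.2.2 = PySem.Set.empty → (∀ v, 0 ≤ st.2.1.getD v 0) →
      ((l.foldl (solutionStep k) st).2.2 = PySem.Set.empty ∧
       ∀ v, 0 ≤ (l.foldl (solutionStep k) st).2.1.getD v 0) := by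
  induction l with
  | nil => intro st h1 h2; exact ⟨h1, h2⟩
  | cons p l ih =>
    intro st h1 h2
    simp only [List.foldl_cons]
    obtain ⟨g1, g2⟩ := solutionStep_nonpos k hk st p h1 h2
    exact ih _ g1 g2

theorem solution_zero_of_nonpos (id_list : List String) (report : List String) (k : Int)
    (hk : k ≤ 0) :
    solution id_list report k = id_list.map (fun _ => (0 : Int)) := by
  have h := solution_stop_empty_aux k hk report
    (PySem.Dict.empty, PySem.Dict.empty, PySem.Set.empty) rfl
    (fun v => by simp [PySem.Dict.getD_empty])
  simp only [solution]
  apply List.map_congr_left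
  intro uid _
  rw [h.1]
  have : PySem.Set.inter
      ((report.foldl (solutionStep k) (PySem.Dict.empty, PySem.Dict.empty, PySem.Set.empty)).1.getD uid PySem.Set.empty)
      PySem.Set.empty = [] := by
    simp only [PySem.Set.inter, PySem.Set.empty]
    apply List.filter_eq_nil_iff.2
    intro x _
    simp [PySem.Set.contains]
  rw [this]
  rfl

-- membership in B's distinct set comes from some report line (and back)
theorem mem_distinct_aux (l : List String) :
    ∀ acc uv, uv ∈ l.foldl (fun acc p =>
        match PySem.Str.split₀ p with
        | [u, v] => PySem.Set.add acc (u, v)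
        | _ => acc) acc →
      uv ∈ acc ∨ ∃ p ∈ l, PySem.Str.split₀ p = [uv.1, uv.2] := by
  induction l with
  | nil => intro acc uv h; exact Or.inl h
  | cons p l ih =>
    intro acc uv h
    simp only [List.foldl_cons] at h
    rcases ih _ uv h with hm | ⟨q, hq, hsq⟩
    · rcases e : PySem.Str.split₀ p with _ | ⟨u, _ | ⟨v, _ | ⟨w, t⟩⟩⟩ <;>
        rw [e] at hm
      case cons.cons.nil =>
        rcases (PySem.Set.mem_add _ _ _).1 hm with hm' | hm'
        · exact Or.inl hm'
        · subst hm'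
          exact Or.inr ⟨p, List.mem_cons_self, e⟩
      all_goals exact Or.inl hm
    · exact Or.inr ⟨q, List.mem_cons_of_mem _ hq, hsq⟩

theorem distinct_mem_aux (l : List String) :
    ∀ acc uv, uv ∈ acc →
      uv ∈ l.foldl (fun acc p =>
        match PySem.Str.split₀ p with
        | [u, v] => PySem.Set.add acc (u, v)
        | _ => acc) acc := by
  induction l with
  | nil => intro acc uv h; exact h
  | cons p l ih =>
    intro acc uv h
    simp only [List.foldl_cons]
    apply ih
    rcases PySem.Str.split₀ p with _ | ⟨u, _ | ⟨v, _ | ⟨w, t⟩⟩⟩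
    case cons.cons.nil => exact (PySem.Set.mem_add _ _ _).2 (Or.inl h)
    all_goals exact h

theorem mem_distinct_of_report (report : List String) (p : String) (u v : String)
    (hp : p ∈ report) (hs : PySem.Str.split₀ p = [u, v]) :
    (u, v) ∈ solutionAltDistinct report := by
  obtain ⟨l1, l2, rfl⟩ := List.append_of_mem hp
  simp only [solutionAltDistinct, List.foldl_append, List.foldl_cons, hs]
  apply distinct_mem_aux
  exact (PySem.Set.mem_add _ _ _).2 (Or.inr rfl)

-- For k ≤ 0 every reported user is banned in B, so B's entry at uid is uid's
-- distinct-report out-degree.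
theorem alt_banned_all (report : List String) (k : Int) (hk : k ≤ 0) (uv : String × String)
    (huv : uv ∈ solutionAltDistinct report) :
    PySem.Set.contains (PySem.Set.ofList (((solutionAltDistinct report).filter (fun uv =>
      decide (((solutionAltDistinct report).countP (fun uv2 => uv2.2 == uv.2) : Int) ≥ k))).map (·.2)))
      uv.2 = true := by
  rw [PySem.Set.contains_iff, PySem.Set.mem_ofList]
  exact List.mem_map.2 ⟨uv, List.mem_filter.2 ⟨huv, by
    simp only [decide_eq_true_eq, ge_iff_le]
    have : 0 ≤ ((solutionAltDistinct report).countP (fun uv2 => uv2.2 == uv.2) : Int) := by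
      positivity
    omega⟩, rfl⟩

-- ===== VERDICT (by name: the statements are the Claim_ definitions above) =====
theorem solution_spec : Claim_unchanged_solution := by
  intro id_list report k _hdom hpre
  unfold Spec_solution
  intro hnD
  by_cases hk : 1 ≤ k
  · exact solution_eq_alt_of_pos id_list report k hk hpre
  · -- k ≤ 0 and (from ¬D_) no report line's reporter is in id_list: both are all zeros
    have hk0 : k ≤ 0 := by omega
    have hno : ∀ p ∈ report, ∀ u v, PySem.Str.split₀ p = [u, v] → u ∉ id_list := by
      intro p hp u v hs hu
      apply hnD
      refine ⟨hk0, List.any_eq_true.2 ⟨p, hp, ?_⟩⟩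
      rw [hs]
      simp [hu]
    rw [solution_zero_of_nonpos id_list report k hk0]
    simp only [solution_alt]
    apply List.map_congr_left
    intro uid huid
    have : (solutionAltDistinct report).countP (fun uv => uv.1 == uid &&
        PySem.Set.contains (PySem.Set.ofList (((solutionAltDistinct report).filter (fun uv =>
          decide (((solutionAltDistinct report).countP (fun uv2 => uv2.2 == uv.2) : Int) ≥ k))).map (·.2))) uv.2) = 0 := by
      apply List.countP_eq_zero.2
      intro uv huv
      rcases mem_distinct_aux report PySem.Set.empty uv huv with hm | ⟨p, hp, hs⟩
      · exact absurd hm (List.not_mem_nil)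
      · have : uv.1 ≠ uid := fun he => hno p hp uv.1 uv.2 hs (he ▸ huid)
        simp [this]
    rw [this]
    rfl

theorem solution_changed : Claim_changed_solution := by
  unfold Claim_changed_solution; decide

theorem solution_tight : Claim_exact_solution := by
  intro id_list report k _hdom hpre hD heq
  obtain ⟨hk0, hany⟩ := hD
  obtain ⟨p, hp, hpred⟩ := List.any_eq_true.1 hany
  obtain ⟨u, v, hs⟩ : ∃ u v, PySem.Str.split₀ p = [u, v] := by
    have := hpre p hp
    rcases e : PySem.Str.split₀ p with _ | ⟨a, _ | ⟨b, _ | ⟨c, t⟩⟩⟩ <;> simp_all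
  rw [hs] at hpred
  simp only [List.contains_eq_mem, decide_eq_true_eq] at hpred
  have huv : (u, v) ∈ solutionAltDistinct report := mem_distinct_of_report report p u v hp hs
  rw [solution_zero_of_nonpos id_list report k hk0] at heq
  simp only [solution_alt] at heq
  have hpt := (List.map_inj_left).1 heq u hpred
  have hone : 1 ≤ (solutionAltDistinct report).countP (fun uv => uv.1 == u &&
      PySem.Set.contains (PySem.Set.ofList (((solutionAltDistinct report).filter (fun uv =>
        decide (((solutionAltDistinct report).countP (fun uv2 => uv2.2 == uv.2) : Int) ≥ k))).map (·.2))) uv.2) := by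
    apply List.countP_pos_iff.2
    refine ⟨(u, v), huv, ?_⟩
    simpa using alt_banned_all report k hk0 (u, v) huv
  omega
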